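-- pv_equiv track=rewrite | github.com/thorntizzle/player-wiki-app | player_wiki/systems_importer.py | _normalize_entry_types
-- ===== SOURCE A (Python) =====
-- SUPPORTED_ENTRY_TYPES = (
--     "action",
--     "background",
--     "book",
--     "class",
--     "classfeature",
--     "condition",
--     "disease",
--     "feat",
--     "item",
--     "monster",
--     "optionalfeature",
--     "race",
--     "sense",
--     "skill",
--     "spell",
--     "status",
--     "subclass",
--     "subclassfeature",
--     "variantrule",
-- )
--
-- def _normalize_entry_types(entry_types: list[str] | None) -> list[str]:
--     if not entry_types:
--         return list(SUPPORTED_ENTRY_TYPES)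
--     normalized: list[str] = []
--     seen: set[str] = set()
--     for entry_type in entry_types:
--         normalized_type = str(entry_type).strip().lower()
--         if normalized_type not in SUPPORTED_ENTRY_TYPES:
--             raise ValueError(f"Unsupported entry type: {entry_type}")
--         if normalized_type in seen:
--             continue
--         seen.add(normalized_type)
--         normalized.append(normalized_type)
--     return normalized
-- ===== SOURCE B (Python) =====
-- SUPPORTED_ENTRY_TYPES = (
--     "action",
--     "background",
--     "book",
--     "class",
--     "classfeature",
--     "condition",
--     "disease",
--     "feat",
--     "item",
--     "monster",
--     "optionalfeature",
--     "race",
--     "sense",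
--     "skill",
--     "spell",
--     "status",
--     "subclass",
--     "subclassfeature",
--     "variantrule",
-- )
--
--
-- def _normalize_entry_types(entry_types):
--     if not entry_types:
--         return list(SUPPORTED_ENTRY_TYPES)
--     # pass 1: normalize + validate (raise on the first unsupported element)
--     pending = []
--     for e in entry_types:
--         nt = str(e).strip().lower()
--         if nt not in SUPPORTED_ENTRY_TYPES:
--             raise ValueError(f"Unsupported entry type: {e}")
--         pending.append(nt)
--     # pass 2: dedup by repeated filtering — take the head, erase every later
--     # copy of it from the worklist; no auxiliary 'seen' set is maintained.
--     out = []
--     while pending: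
--         head = pending[0]
--         out.append(head)
--         pending = [y for y in pending[1:] if y != head]
--     return out
-- ===== Notes on version B (the rewrite author's own statement) =====
-- stated objective: alternative
-- what changed: Deduplication no longer maintains a seen-set during one pass: B first normalizes/validates into a worklist, then dedups by repeatedly taking the head and filtering all its later copies out of the worklist (quotient-by-filtering instead of membership-set bookkeeping).
import Mathlib
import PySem

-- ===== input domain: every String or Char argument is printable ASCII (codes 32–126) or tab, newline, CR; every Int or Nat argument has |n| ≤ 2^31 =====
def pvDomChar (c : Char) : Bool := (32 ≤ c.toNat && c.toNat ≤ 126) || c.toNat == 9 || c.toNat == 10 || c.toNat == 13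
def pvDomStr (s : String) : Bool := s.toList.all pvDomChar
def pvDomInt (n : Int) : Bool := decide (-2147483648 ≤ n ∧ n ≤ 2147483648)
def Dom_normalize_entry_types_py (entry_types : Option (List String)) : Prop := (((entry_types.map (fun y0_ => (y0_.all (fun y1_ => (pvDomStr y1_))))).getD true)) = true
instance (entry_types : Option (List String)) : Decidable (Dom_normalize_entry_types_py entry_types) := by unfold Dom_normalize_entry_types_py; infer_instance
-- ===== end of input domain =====

-- ===== PORT A =====
-- _normalize_entry_types: B drops A's interleaved seen-set bookkeeping and instead dedups a
-- pre-validated worklist by repeatedly taking the head and filtering out its later copies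
-- ('alternative' objective, same observable behaviour). A raises ValueError on an
-- unsupported entry; those inputs are outside Pre_ below.

-- SUPPORTED_ENTRY_TYPES (module constant, shared by both Pythons)
def pvSupported : List String :=
  ["action", "background", "book", "class", "classfeature", "condition",
   "disease", "feat", "item", "monster", "optionalfeature", "race", "sense",
   "skill", "spell", "status", "subclass", "subclassfeature", "variantrule"]

-- str(entry_type).strip().lower()
def pvNorm (s : String) : String := PySem.Str.lower (PySem.Str.strip s)

-- A's for-loop: state (seen, normalized); none = the ValueError branch
def normAloop (xs : List String) (seen : PySem.Set String) (acc : List String) :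
    Option (List String) :=
  match xs with
  | [] => some acc
  | e :: rest =>
    let nt := pvNorm e
    if ¬ pvSupported.contains nt then none
    else if PySem.Set.contains seen nt then normAloop rest seen acc
    else normAloop rest (PySem.Set.add seen nt) (acc ++ [nt])

def normalize_entry_types_py (entry_types : Option (List String)) : List String :=
  match entry_types with
  | none => pvSupported
  | some xs =>
    if xs = [] then pvSupported
    else (normAloop xs PySem.Set.empty []).getD []

-- ===== PORT B =====
-- B pass 1: normalize + validate, building the worklist; none = the ValueError branch
def normBvalidate (xs : List String) : Option (List String) :=
  match xs with
  | [] => some []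
  | e :: rest =>
    let nt := pvNorm e
    if ¬ pvSupported.contains nt then none
    else (normBvalidate rest).map (fun t => nt :: t)

-- B pass 2: the while-loop — take the head, filter its copies out of the worklist
def normBdedup (pending : List String) : List String :=
  match pending with
  | [] => []
  | head :: t => head :: normBdedup (t.filter (fun y => y != head))
termination_by pending.length
decreasing_by
  simp only [List.length_cons, List.length_unattach]
  have h1 := List.length_filter_le (fun x : {x // x ∈ t} => ↑x != head) t.attach
  simp only [List.length_attach] at h1
  exact Nat.lt_succ_of_le h1

def normalize_entry_types_py_alt (entry_types : Option (List String)) : List String :=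
  match entry_types with
  | none => pvSupported
  | some xs =>
    if xs = [] then pvSupported
    else
      match normBvalidate xs with
      | some pending => normBdedup pending
      | none => []

-- ===== PRECONDITION & SPEC =====
-- Pre_ excludes exactly the inputs on which A raises ValueError: a list containing
-- an element whose stripped/lowered form is not a supported entry type.
def Pre_normalize_entry_types_py (entry_types : Option (List String)) : Prop :=
  ∀ e ∈ entry_types.getD [], pvNorm e ∈ pvSupported
instance (entry_types : Option (List String)) : Decidable (Pre_normalize_entry_types_py entry_types) := by unfold Pre_normalize_entry_types_py; infer_instance

def pvWitness_normalize_entry_types_py : Option (List String) :=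
  some ["Spell", " feat ", "SPELL"]

def Spec_normalize_entry_types_py (entry_types : Option (List String)) (out : List String) : Prop := out = normalize_entry_types_py_alt entry_types
instance (entry_types : Option (List String)) (out : List String) : Decidable (Spec_normalize_entry_types_py entry_types out) := by unfold Spec_normalize_entry_types_py; infer_instance

-- ===== CLAIM (what is proved, stated in full; the proofs are below) =====
def Claim_equal_normalize_entry_types_py : Prop := ∀ (entry_types : Option (List String)), Dom_normalize_entry_types_py entry_types → Pre_normalize_entry_types_py entry_types → Spec_normalize_entry_types_py entry_types (normalize_entry_types_py entry_types)

-- ===== LEMMAS AND PROOFS =====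

-- A's loop keeps acc equal to seen's underlying list; when every element is
-- supported it computes foldl Set.add over the normalized elements.
theorem normAloop_eq_foldl (xs : List String) (s : PySem.Set String)
    (h : ∀ e ∈ xs, pvSupported.contains (pvNorm e) = true) :
    normAloop xs s s = some (List.foldl PySem.Set.add s (xs.map pvNorm)) := by
  induction xs generalizing s with
  | nil => simp [normAloop]
  | cons e rest ih =>
    have he := h e (List.mem_cons_self ..)
    have hrest : ∀ x ∈ rest, pvSupported.contains (pvNorm x) = true :=
      fun x hx => h x (List.mem_cons_of_mem _ hx)
    simp only [normAloop, he, not_true, if_false, List.map_cons, List.foldl_cons]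
    split_ifs with hc
    · have hadd : PySem.Set.add s (pvNorm e) = s := by
        simp [PySem.Set.add, PySem.Set.contains] at hc ⊢
        simp [hc]
      rw [hadd, ih s hrest]
    · have hadd : PySem.Set.add s (pvNorm e) = s ++ [pvNorm e] := by
        simp [PySem.Set.add, PySem.Set.contains] at hc ⊢
        simp [hc]
      rw [← hadd, ih _ hrest]

-- B's validation pass returns the normalized list when everything is supported.
theorem normBvalidate_eq_map (xs : List String)
    (h : ∀ e ∈ xs, pvSupported.contains (pvNorm e) = true) :
    normBvalidate xs = some (xs.map pvNorm) := by
  induction xs with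
  | nil => simp [normBvalidate]
  | cons e rest ih =>
    have hm : pvNorm e ∈ pvSupported := by simpa using h e (List.mem_cons_self ..)
    simp [normBvalidate, hm, ih (fun x hx => h x (List.mem_cons_of_mem _ hx))]

-- unfolding lemmas for the well-founded recursion of normBdedup
theorem normBdedup_nil : normBdedup [] = [] := by unfold normBdedup; rfl

theorem normBdedup_cons (h : String) (t : List String) :
    normBdedup (h :: t) = h :: normBdedup (t.filter (fun y => y != h)) := by
  conv_lhs => unfold normBdedup

-- The seen-set fold and B's repeated-filter dedup compute the same list:
-- general invariant relating a partial seen list s to a filtered worklist.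
theorem foldl_add_eq_filterDedup (ys : List String) (s : List String) :
    List.foldl PySem.Set.add s ys
      = s ++ normBdedup (ys.filter (fun y => !(s.contains y))) := by
  induction ys generalizing s with
  | nil => simp [normBdedup_nil]
  | cons y ys ih =>
    simp only [List.foldl_cons]
    by_cases hc : s.contains y = true
    · have hm : y ∈ s := by simpa using hc
      have hadd : PySem.Set.add s y = s := by
        simp [PySem.Set.add, PySem.Set.contains, hm]
      rw [hadd, ih s, List.filter_cons]
      simp [hm]
    · have hm : y ∉ s := by simpa using hc
      have hadd : PySem.Set.add s y = s ++ [y] := by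
        simp [PySem.Set.add, PySem.Set.contains, hm]
      rw [hadd, ih (s ++ [y]), List.filter_cons]
      rw [if_pos (show (!s.contains y) = true by simpa using hc), normBdedup_cons]
      have hfil : (ys.filter (fun z => !((s ++ [y]).contains z)))
          = ((ys.filter (fun z => !(s.contains z))).filter (fun z => z != y)) := by
        rw [List.filter_filter]
        apply List.filter_congr
        intro z _
        simp only [List.contains_append, List.contains_cons, List.contains_nil,
          Bool.or_false, Bool.not_or, bne]
        cases hz : s.contains z <;> cases hzy : z == y <;> simp_all [Bool.and_comm]
      rw [hfil]
      simp

-- ===== VERDICT (by name: the statement is the Claim_ definition above) =====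
theorem normalize_entry_types_py_spec : Claim_equal_normalize_entry_types_py := by
  intro et _hdom hpre
  unfold Spec_normalize_entry_types_py
  cases et with
  | none => rfl
  | some xs =>
    by_cases hnil : xs = []
    · simp [normalize_entry_types_py, normalize_entry_types_py_alt, hnil]
    · unfold Pre_normalize_entry_types_py at hpre
      simp only [Option.getD_some] at hpre
      have hco : ∀ e ∈ xs, pvSupported.contains (pvNorm e) = true :=
        fun e he => List.contains_iff_mem.mpr (hpre e he)
      simp only [normalize_entry_types_py, normalize_entry_types_py_alt,
        if_neg hnil]
      have h0 : normAloop xs PySem.Set.empty [] =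
          normAloop xs PySem.Set.empty PySem.Set.empty := rfl
      rw [h0, normAloop_eq_foldl xs PySem.Set.empty hco,
        normBvalidate_eq_map xs hco, Option.getD_some]
      have := foldl_add_eq_filterDedup (xs.map pvNorm) []
      simpa [PySem.Set.empty] using this
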